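-- pv_equiv track=rewrite | github.com/vladsavelyev/TargQC | tab_utils/support.py | filenames_to_uniq
-- ===== SOURCE A (Python) =====
-- def filenames_to_uniq(names,new_delim='.'):
--     '''
--     Given a set of file names, produce a list of names consisting of the
--     uniq parts of the names. This works from the end of the name.  Chunks of
--     the name are split on '.' and '-'.
--
--     For example:
--         A.foo.bar.txt
--         B.foo.bar.txt
--         returns: ['A','B']
--
--         AA.BB.foo.txt
--         CC.foo.txt
--         returns: ['AA.BB','CC']
--
--     '''
--     name_words = []
--     maxlen = 0
--     for name in names:
--         name_words.append(name.replace('.',' ').replace('-',' ').strip().split())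
--         name_words[-1].reverse()
--         if len(name_words[-1]) > maxlen:
--             maxlen = len(name_words[-1])
--
--     common = [False,] * maxlen
--     for i in range(maxlen):
--         last = None
--         same = True
--         for nameword in name_words:
--             if i >= len(nameword):
--                 same = False
--                 break
--             if not last:
--                 last = nameword[i]
--             elif nameword[i] != last:
--                 same = False
--                 break
--         common[i] = same
--
--     newnames = []
--     for nameword in name_words:
--         nn = []
--         for (i, val) in enumerate(common):
--             if not val and i < len(nameword):
--                 nn.append(nameword[i])
--         nn.reverse()
--         newnames.append(new_delim.join(nn))
--
--     return newnames
-- ===== SOURCE B (Python) =====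
-- def filenames_to_uniq(names, new_delim='.'):
--     '''Set-intersection rewrite: instead of building a boolean common-mask by
--     scanning each column of words, intersect the sets of (position, word) pairs
--     of all names (positions counted from the end); a position is common exactly
--     when some pair with that position survives the intersection.'''
--     rev = [name.replace('.', ' ').replace('-', ' ').strip().split()[::-1] for name in names]
--     pair_sets = [{(i, w) for i, w in enumerate(r)} for r in rev]
--     shared = set.intersection(*pair_sets) if pair_sets else set()
--     common_idx = {i for i, _ in shared}
--     return [new_delim.join(w for i, w in reversed(list(enumerate(r)))
--                            if i not in common_idx)
--             for r in rev]
-- ===== Notes on version B (the rewrite author's own statement) =====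
-- stated objective: alternative
-- what changed: Replaced A's column-by-column mask computation (nested scan with early break, then a per-name filter against the boolean mask) by a set-intersection algorithm: intersect the sets of (position, word) pairs of all names; a position is common exactly when a pair at that position survives the intersection, and each output keeps the words whose position is outside that set.
import Mathlib
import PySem

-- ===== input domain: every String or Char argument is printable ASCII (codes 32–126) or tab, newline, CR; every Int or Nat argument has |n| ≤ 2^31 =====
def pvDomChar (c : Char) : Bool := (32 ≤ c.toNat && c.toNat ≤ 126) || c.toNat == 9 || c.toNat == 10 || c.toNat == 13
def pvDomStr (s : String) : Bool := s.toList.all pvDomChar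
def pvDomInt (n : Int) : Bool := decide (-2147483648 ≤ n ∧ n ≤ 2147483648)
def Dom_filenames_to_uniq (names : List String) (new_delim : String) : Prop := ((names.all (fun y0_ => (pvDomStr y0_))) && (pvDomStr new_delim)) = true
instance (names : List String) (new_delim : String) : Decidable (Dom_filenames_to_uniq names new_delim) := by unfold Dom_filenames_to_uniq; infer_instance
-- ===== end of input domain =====

-- B replaces A's boolean-mask scheme (per-column scan with early break, then a
-- per-name filter against the mask) by a set-intersection algorithm over
-- (position, word) pairs; same complexity, a different algorithm.

-- ===== PORT A =====
-- name.replace('.',' ').replace('-',' ').strip().split()   (shared: both Pythons contain this very expression)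
def pvChunks (name : String) : List String :=
  PySem.Str.split₀ (PySem.Str.strip (PySem.Str.replace (PySem.Str.replace name "." " ") "-" " "))

-- A's inner mask loop over name_words with early break; 'last' starts as None.
-- split() never yields empty words, so Python's 'if not last' is exactly 'last is None' here.
def pvSameLoop (nws : List (List String)) (i : Nat) (last : Option String) : Bool :=
  match nws with
  | [] => true
  | nw :: rest =>
    if nw.length ≤ i then false
    else
      match last with
      | none => pvSameLoop rest i (some (nw.getD i ""))
      | some l => if nw.getD i "" ≠ l then false else pvSameLoop rest i (some l)

def filenames_to_uniq (names : List String) (new_delim : String) : List String :=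
  -- first loop: build name_words (each reversed) and maxlen
  let st := names.foldl (fun (st : List (List String) × Nat) name =>
      let w := (pvChunks name).reverse
      (st.1 ++ [w], if w.length > st.2 then w.length else st.2)) ([], 0)
  -- second loop: common[i] for i in range(maxlen)
  let common := (List.range st.2).map (fun i => pvSameLoop st.1 i none)
  -- third loop: per name, collect words at non-common positions, reverse, join
  st.1.foldl (fun newnames nw =>
      let nn := (PySem.List.enumerate common).foldl (fun nn p =>
          if (!p.2 && decide (p.1 < (nw.length : Int))) = true then nn ++ [nw.getD p.1.toNat ""] else nn) []
      newnames ++ [PySem.Str.join new_delim nn.reverse]) []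

-- ===== PORT B =====
def filenames_to_uniq_alt (names : List String) (new_delim : String) : List String :=
  let rev := names.map (fun name => (pvChunks name).reverse)
  let pairSets := rev.map (fun r => PySem.Set.ofList (PySem.List.enumerate r))
  let shared : PySem.Set (Int × String) :=
    match pairSets with
    | [] => PySem.Set.empty
    | p :: ps => ps.foldl PySem.Set.inter p
  let commonIdx := PySem.Set.ofList (shared.map (fun p => p.1))
  rev.map (fun r => PySem.Str.join new_delim
    (((PySem.List.enumerate r).reverse.filter
        (fun p => !PySem.Set.contains commonIdx p.1)).map (fun p => p.2)))

-- ===== PRECONDITION & SPEC =====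
def Spec_filenames_to_uniq (names : List String) (new_delim : String) (out : List String) : Prop := out = filenames_to_uniq_alt names new_delim
instance (names : List String) (new_delim : String) (out : List String) : Decidable (Spec_filenames_to_uniq names new_delim out) := by unfold Spec_filenames_to_uniq; infer_instance

-- ===== CLAIM (what is proved, stated in full; the proofs are below) =====
def Claim_equal_filenames_to_uniq : Prop := ∀ (names : List String) (new_delim : String), Dom_filenames_to_uniq names new_delim → Spec_filenames_to_uniq names new_delim (filenames_to_uniq names new_delim)

-- ===== LEMMAS AND PROOFS =====

-- the words a name contributes to its output when columns 0..w-1 have been judged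
def pvNN (rev : List (List String)) (r : List String) (w : Nat) : List String :=
  ((List.range w).filter (fun i => !pvSameLoop rev i none && decide (i < r.length))).map (fun i => r.getD i "")

-- A's first loop builds the mapped list and the running maximum of lengths
theorem pv_buildA (names : List String) (acc : List (List String)) (m : Nat) :
    names.foldl (fun (st : List (List String) × Nat) name =>
      let w := (pvChunks name).reverse
      (st.1 ++ [w], if w.length > st.2 then w.length else st.2)) (acc, m)
    = (acc ++ names.map (fun n => (pvChunks n).reverse),
       (names.map (fun n => (pvChunks n).reverse.length)).foldl max m) := by
  induction names generalizing acc m with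
  | nil => simp
  | cons n ns ih =>
    simp only [List.foldl_cons, List.map_cons]
    rw [ih]
    have hm : (if (pvChunks n).reverse.length > m then (pvChunks n).reverse.length else m)
        = max m (pvChunks n).reverse.length := by split <;> omega
    rw [hm]
    simp

theorem pv_sameLoop_some (rest : List (List String)) (i : Nat) (l : String) :
    pvSameLoop rest i (some l) = true ↔ ∀ r ∈ rest, i < r.length ∧ r.getD i "" = l := by
  induction rest with
  | nil => simp [pvSameLoop]
  | cons r rs ih =>
    simp only [pvSameLoop]
    by_cases h : r.length ≤ i
    · rw [if_pos h]
      simp only [Bool.false_eq_true, false_iff]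
      intro hall
      exact absurd (hall r (by simp)).1 (by omega)
    · rw [if_neg h]
      by_cases he : r.getD i "" = l
      · rw [if_neg (not_not_intro he), ih]
        constructor
        · intro hall x hx
          rcases List.mem_cons.1 hx with rfl | hx
          · exact ⟨by omega, he⟩
          · exact hall x hx
        · intro hall x hx
          exact hall x (by simp [hx])
      · rw [if_pos he]
        simp only [Bool.false_eq_true, false_iff]
        intro hall
        exact absurd (hall r (by simp)).2 he

theorem pv_sameLoop_none (r0 : List String) (rest : List (List String)) (i : Nat) :
    pvSameLoop (r0 :: rest) i none = true ↔
      i < r0.length ∧ ∀ r ∈ rest, i < r.length ∧ r.getD i "" = r0.getD i "" := by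
  simp only [pvSameLoop]
  by_cases h : r0.length ≤ i
  · rw [if_pos h]
    simp only [Bool.false_eq_true, false_iff]
    intro hall
    exact absurd hall.1 (by omega)
  · rw [if_neg h, pv_sameLoop_some]
    constructor
    · intro hall
      exact ⟨by omega, hall⟩
    · intro hall
      exact hall.2

-- membership in B's folded intersection
theorem pv_mem_foldl_inter {α : Type} [BEq α] [LawfulBEq α]
    (ps : List (PySem.Set α)) (p : PySem.Set α) (x : α) :
    x ∈ ps.foldl PySem.Set.inter p ↔ x ∈ p ∧ ∀ q ∈ ps, x ∈ q := by
  induction ps generalizing p with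
  | nil => simp
  | cons q qs ih =>
    rw [List.foldl_cons, ih]
    rw [PySem.Set.mem_inter]
    constructor
    · rintro ⟨⟨hp, hq⟩, hall⟩
      exact ⟨hp, fun s hs => by rcases List.mem_cons.1 hs with rfl | hs; exact hq; exact hall s hs⟩
    · rintro ⟨hp, hall⟩
      exact ⟨⟨hp, hall q (by simp)⟩, fun s hs => hall s (by simp [hs])⟩

-- a nonneg position is in B's common-index set iff A's inner loop reports 'same'
theorem pv_common_iff (r0 : List String) (rest : List (List String)) (i : Nat) :
    PySem.Set.contains
        (PySem.Set.ofList
          (((rest.map (fun r => PySem.Set.ofList (PySem.List.enumerate r))).foldl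
              PySem.Set.inter (PySem.Set.ofList (PySem.List.enumerate r0))).map (fun p => p.1)))
        ((i : Int))
      = pvSameLoop (r0 :: rest) i none := by
  rcases hb : pvSameLoop (r0 :: rest) i none with _ | _
  · rw [Bool.eq_false_iff]
    intro hc
    rw [PySem.Set.contains_iff, PySem.Set.mem_ofList] at hc
    rcases List.mem_map.1 hc with ⟨⟨j, w⟩, hmem, hj⟩
    simp only at hj
    subst hj
    rw [pv_mem_foldl_inter] at hmem
    rcases hmem with ⟨h0, hall⟩
    rw [PySem.Set.mem_ofList, PySem.List.mem_enumerate_iff] at h0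
    rcases h0 with ⟨k, hk, hkeq⟩
    have hik : i = k := by
      have := congrArg Prod.fst hkeq
      simp at this
      omega
    subst hik
    have hw : w = r0[i] := by
      have := congrArg Prod.snd hkeq
      simpa using this
    have : pvSameLoop (r0 :: rest) i none = true := by
      rw [pv_sameLoop_none]
      refine ⟨hk, fun r hr => ?_⟩
      have hq := hall _ (List.mem_map_of_mem hr)
      rw [PySem.Set.mem_ofList, PySem.List.mem_enumerate_iff] at hq
      rcases hq with ⟨k', hk', hkeq'⟩
      have hik' : i = k' := by
        have := congrArg Prod.fst hkeq'
        simp at this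
        omega
      subst hik'
      have hw' : w = r[i] := by
        have := congrArg Prod.snd hkeq'
        simpa using this
      refine ⟨hk', ?_⟩
      rw [List.getD_eq_getElem _ _ hk', List.getD_eq_getElem _ _ hk, ← hw', hw]
    rw [this] at hb
    exact Bool.noConfusion hb
  · rw [pv_sameLoop_none] at hb
    rcases hb with ⟨h0, hall⟩
    rw [PySem.Set.contains_iff, PySem.Set.mem_ofList]
    refine List.mem_map.2 ⟨((i : Int), r0.getD i ""), ?_, rfl⟩
    rw [pv_mem_foldl_inter]
    constructor
    · rw [PySem.Set.mem_ofList, PySem.List.mem_enumerate_iff]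
      refine ⟨i, h0, ?_⟩
      simp [List.getElem?_eq_getElem h0]
    · intro q hq
      rcases List.mem_map.1 hq with ⟨r, hr, rfl⟩
      rw [PySem.Set.mem_ofList, PySem.List.mem_enumerate_iff]
      rcases hall r hr with ⟨hlen, heq⟩
      refine ⟨i, hlen, ?_⟩
      rw [List.getD_eq_getElem _ _ hlen, List.getD_eq_getElem _ _ h0] at heq
      simp [List.getElem?_eq_getElem h0, heq]

-- filtering the enumeration on positions = filtering the index range
theorem pv_enum_filter_map (r : List String) (s : Int) (q : Int × String → Bool) :
    ((PySem.List.enumerate r s).filter q).map (fun p => p.2)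
    = ((List.range r.length).filter (fun (i : Nat) => q (s + (i : Int), r.getD i ""))).map
        (fun (i : Nat) => r.getD i "") := by
  induction r generalizing s with
  | nil => simp [PySem.List.enumerate_nil]
  | cons x xs ih =>
    rw [PySem.List.enumerate_cons]
    simp only [List.length_cons, List.range_succ_eq_map]
    rw [List.filter_cons, List.filter_cons]
    have h0 : q (s + ((0 : Nat) : Int), (x :: xs).getD 0 "") = q (s, x) := by norm_num
    rw [h0]
    have hmapfilter :
        (List.filter (fun (i : Nat) => q (s + (i : Int), (x :: xs).getD i ""))
          (List.map Nat.succ (List.range xs.length)))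
        = List.map Nat.succ
            (List.filter (fun (i : Nat) => q ((s + 1) + (i : Int), xs.getD i "")) (List.range xs.length)) := by
      rw [List.filter_map]
      congr 1
      apply List.filter_congr
      intro i _
      simp only [Function.comp, Nat.succ_eq_add_one, List.getD_cons_succ]
      congr 2
      push_cast
      ring
    by_cases hp : q (s, x) = true
    · rw [if_pos hp, if_pos hp]
      simp only [List.map_cons, List.getD_cons_zero]
      congr 1
      rw [ih (s + 1), hmapfilter, List.map_map]
      apply List.map_congr_left
      intro i _
      simp [Function.comp, Nat.succ_eq_add_one]
    · rw [if_neg hp, if_neg hp]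
      rw [ih (s + 1), hmapfilter, List.map_map]
      apply List.map_congr_left
      intro i _
      simp [Function.comp, Nat.succ_eq_add_one]

-- the range-bound conjunct in A's filter trims range maxlen down to range n
theorem pv_range_trim (q : Nat → Bool) (n w : Nat) (h : n ≤ w) :
    (List.range w).filter (fun i => q i && decide (i < n))
    = (List.range n).filter q := by
  induction w with
  | zero =>
    have hn : n = 0 := by omega
    subst hn
    rfl
  | succ w ih =>
    by_cases hw : n ≤ w
    · rw [List.range_succ, List.filter_append, ih hw]
      have : (List.filter (fun i => q i && decide (i < n)) [w]) = [] := by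
        simp only [List.filter_cons, List.filter_nil]
        have : decide (w < n) = false := by simp; omega
        simp [this]
      rw [this, List.append_nil]
    · have hn : n = w + 1 := by omega
      subst hn
      apply List.filter_congr
      intro i hi
      have : i < w + 1 := List.mem_range.1 hi
      simp [this]

theorem pv_foldl_max_base (l : List Nat) (m : Nat) : m ≤ l.foldl max m := by
  induction l generalizing m with
  | nil => simp
  | cons z zs ih => exact le_trans (le_max_left m z) (ih (max m z))

theorem pv_le_foldl_max (l : List Nat) (m x : Nat) (hx : x ∈ l) : x ≤ l.foldl max m := by
  induction l generalizing m with
  | nil => simp at hx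
  | cons y ys ih =>
    rw [List.foldl_cons]
    rcases List.mem_cons.1 hx with rfl | hx
    · exact le_trans (le_max_right m x) (pv_foldl_max_base ys (max m x))
    · exact ih (max m y) hx

-- enumerate of the common mask is the range paired with the mask function
theorem pv_enumerate_map_range (f : Nat → Bool) (w : Nat) :
    PySem.List.enumerate ((List.range w).map f) = (List.range w).map (fun (i : Nat) => ((i : Int), f i)) := by
  induction w with
  | zero => simp [PySem.List.enumerate_nil]
  | succ w ih =>
    rw [List.range_succ, List.map_append, List.map_append,
      PySem.List.enumerate_append, ih]
    simp [PySem.List.enumerate_cons, PySem.List.enumerate_nil]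

-- A's per-name inner fold computes pvNN
theorem pv_A_nn (rev : List (List String)) (r : List String) (w : Nat) :
    (PySem.List.enumerate ((List.range w).map (fun i => pvSameLoop rev i none))).foldl
      (fun nn p => if (!p.2 && decide (p.1 < (r.length : Int))) = true
        then nn ++ [r.getD p.1.toNat ""] else nn) []
    = pvNN rev r w := by
  rw [pv_enumerate_map_range, PySem.List.foldl_append_if, List.filter_map, List.map_map]
  simp only [List.nil_append, pvNN]
  have hf : ∀ i ∈ List.range w,
      ((fun (p : Int × Bool) => !p.2 && decide (p.1 < (r.length : Int))) ∘
        (fun (i : Nat) => ((i : Int), pvSameLoop rev i none))) i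
      = (fun i => !pvSameLoop rev i none && decide (i < r.length)) i := by
    intro i _
    simp [Function.comp]
  rw [List.filter_congr hf]
  apply List.map_congr_left
  intro i _
  simp [Function.comp]

-- per-name agreement of A's mask filter with B's intersection filter
set_option maxHeartbeats 1600000 in
theorem pv_key (new_delim n : String) (ns : List String) (r : List String)
    (hr : r ∈ (pvChunks n).reverse :: List.map (fun n => (pvChunks n).reverse) ns) :
    PySem.Str.join new_delim
      (List.foldl
          (fun nn p => if (!p.2 && decide (p.1 < (r.length : Int))) = true
            then nn ++ [r.getD p.1.toNat ""] else nn) []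
          (PySem.List.enumerate
            (List.map
              (fun i => pvSameLoop ((pvChunks n).reverse :: List.map (fun n => (pvChunks n).reverse) ns) i none)
              (List.range
                (List.foldl max 0
                  ((pvChunks n).reverse.length :: List.map (fun n => (pvChunks n).reverse.length) ns)))))).reverse
    = PySem.Str.join new_delim
        (List.map (fun p => p.2)
          (List.filter
            (fun p =>
              !(PySem.Set.ofList
                  (List.map (fun p => p.1)
                    (List.foldl PySem.Set.inter
                      (PySem.Set.ofList (PySem.List.enumerate (pvChunks n).reverse))
                      (List.map (fun r => PySem.Set.ofList (PySem.List.enumerate r))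
                        (List.map (fun n => (pvChunks n).reverse) ns))))).contains p.1)
            (PySem.List.enumerate r).reverse)) := by
  congr 1
  rw [pv_A_nn]
  rw [List.filter_reverse, List.map_reverse]
  rw [pv_enum_filter_map]
  have hcontains : ∀ i ∈ List.range r.length,
      (fun (i : Nat) =>
        !(PySem.Set.ofList
            (List.map (fun p => p.1)
              (List.foldl PySem.Set.inter
                (PySem.Set.ofList (PySem.List.enumerate (pvChunks n).reverse))
                (List.map (fun r => PySem.Set.ofList (PySem.List.enumerate r))
                  (List.map (fun n => (pvChunks n).reverse) ns))))).contains ((0 : Int) + (i : Int))) i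
      = (fun (i : Nat) => !pvSameLoop ((pvChunks n).reverse :: List.map (fun n => (pvChunks n).reverse) ns) i none) i := by
    intro i _
    have h := pv_common_iff (pvChunks n).reverse (List.map (fun n => (pvChunks n).reverse) ns) i
    simp only [zero_add]
    rw [h]
  rw [List.filter_congr hcontains]
  have hlen : r.length ≤ List.foldl max 0
      ((pvChunks n).reverse.length :: List.map (fun n => (pvChunks n).reverse.length) ns) := by
    apply pv_le_foldl_max
    rcases List.mem_cons.1 hr with h | h
    · rw [h]
      exact List.mem_cons_self ..
    · rcases List.mem_map.1 h with ⟨x, hx, hxe⟩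
      rw [← hxe]
      exact List.mem_cons_of_mem _ (List.mem_map_of_mem hx)
  unfold pvNN
  rw [pv_range_trim _ _ _ hlen]

set_option maxHeartbeats 1600000 in
-- ===== VERDICT (by name: the statement is the Claim_ definition above) =====
theorem filenames_to_uniq_spec : Claim_equal_filenames_to_uniq := by
  intro names new_delim _
  unfold Spec_filenames_to_uniq filenames_to_uniq filenames_to_uniq_alt
  dsimp only
  rw [pv_buildA]
  cases names with
  | nil => rfl
  | cons n ns =>
    simp only [List.nil_append, List.map_cons]
    rw [PySem.List.foldl_append_singleton_eq_map]
    simp only [List.nil_append]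
    rw [List.map_cons]
    exact congrArg₂ List.cons (pv_key new_delim n ns _ (by simp))
      (List.map_congr_left (fun r hr => pv_key new_delim n ns r (List.mem_cons_of_mem _ hr)))
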